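-- pv_equiv track=rewrite | github.com/shishir-kuet/Text-Information-Retrieval-System | backend/app/services/search_service.py | _exact_phrase_hits
-- ===== SOURCE A (Python) =====
-- def _exact_phrase_hits(query_terms, doc_id, term_positions):
--     if len(query_terms) < 2:
--         return 0
--
--     first_positions = term_positions.get(query_terms[0], {}).get(doc_id, [])
--     if not first_positions:
--         return 0
--
--     lookup_sets = []
--     for term in query_terms[1:]:
--         positions = term_positions.get(term, {}).get(doc_id, [])
--         if not positions:
--             return 0
--         lookup_sets.append(set(positions))
--
--     hits = 0
--     for start in first_positions:
--         if all((start + offset + 1) in lookup_sets[offset] for offset in range(len(lookup_sets))):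
--             hits += 1
--
--     return hits
-- ===== SOURCE B (Python) =====
-- def _exact_phrase_hits(query_terms, doc_id, term_positions):
--     if len(query_terms) < 2:
--         return 0
--
--     def pos(term):
--         return term_positions.get(term, {}).get(doc_id, [])
--
--     # Per-start recursive check along the remaining terms: no lookup sets are built;
--     # each start position is verified directly against each later term's position list.
--     def matches(s, rest):
--         return not rest or (s + 1 in pos(rest[0]) and matches(s + 1, rest[1:]))
--
--     return sum(1 for s in pos(query_terms[0]) if matches(s, query_terms[1:]))
-- ===== Notes on version B (the rewrite author's own statement) =====
-- stated objective: simpler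
-- what changed: B drops A's staged set-building and early-return loop entirely: it counts, in one comprehension, the first-term positions for which a recursive per-start walk verifies each later term directly against its raw position list.
import Mathlib
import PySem

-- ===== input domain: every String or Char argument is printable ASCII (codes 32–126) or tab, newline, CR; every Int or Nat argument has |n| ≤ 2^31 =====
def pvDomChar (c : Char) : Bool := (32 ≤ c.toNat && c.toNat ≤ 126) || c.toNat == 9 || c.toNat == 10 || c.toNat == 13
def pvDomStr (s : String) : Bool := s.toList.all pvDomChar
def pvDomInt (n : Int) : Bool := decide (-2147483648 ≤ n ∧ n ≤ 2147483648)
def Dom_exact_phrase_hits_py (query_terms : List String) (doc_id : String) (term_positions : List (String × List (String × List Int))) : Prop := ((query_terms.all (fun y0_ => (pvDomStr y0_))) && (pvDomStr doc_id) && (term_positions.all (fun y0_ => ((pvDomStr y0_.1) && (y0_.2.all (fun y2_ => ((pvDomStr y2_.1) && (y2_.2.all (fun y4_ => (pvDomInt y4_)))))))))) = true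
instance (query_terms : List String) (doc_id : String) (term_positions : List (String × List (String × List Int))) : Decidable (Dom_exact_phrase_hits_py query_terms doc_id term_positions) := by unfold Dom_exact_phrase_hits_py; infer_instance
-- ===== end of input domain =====

-- B replaces A's staged set-building and per-offset set checks by a direct recursive per-start
-- walk over the raw position lists, counted in one pass (objective: simpler, not faster).

-- ===== PORT A =====
-- term_positions.get(term, {}).get(doc_id, [])
def tpGet (tp : List (String × List (String × List Int))) (term doc : String) : List Int :=
  PySem.Dict.getD (PySem.Dict.mk ((PySem.Dict.mk tp).getD term [])) doc []

-- the 'for term in query_terms[1:]' loop building lookup_sets; 'none' = the early 'return 0'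
def buildSetsA (rest : List String) (doc : String)
    (tp : List (String × List (String × List Int))) : Option (List (PySem.Set Int)) :=
  match rest with
  | [] => some []
  | t :: ts =>
    let positions := tpGet tp t doc
    if positions = [] then none
    else match buildSetsA ts doc tp with
      | none => none
      | some ls => some (PySem.Set.ofList positions :: ls)

-- all((start + offset + 1) in lookup_sets[offset] for offset in range(len(lookup_sets)))
def checkAllA (start : Int) (sets : List (PySem.Set Int)) (offset : Int) : Bool :=
  match sets with
  | [] => true
  | s :: rest => PySem.Set.contains s (start + offset + 1) && checkAllA start rest (offset + 1)

def exact_phrase_hits_py (query_terms : List String) (doc_id : String) (term_positions : List (String × List (String × List Int))) : Int :=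
  match query_terms with
  | [] => 0                                       -- len(query_terms) < 2
  | [_] => 0                                      -- len(query_terms) < 2
  | q0 :: rest =>
    let first_positions := tpGet term_positions q0 doc_id
    if first_positions = [] then 0
    else match buildSetsA rest doc_id term_positions with
      | none => 0
      | some sets =>
        first_positions.foldl (fun hits start => if checkAllA start sets 0 then hits + 1 else hits) 0

-- ===== PORT B =====
-- B's local helper pos(term) = term_positions.get(term, {}).get(doc_id, [])
def posB (tp : List (String × List (String × List Int))) (doc term : String) : List Int :=
  PySem.Dict.getD (PySem.Dict.mk ((PySem.Dict.mk tp).getD term [])) doc []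

-- matches(s, rest): not rest or (s + 1 in pos(rest[0]) and matches(s + 1, rest[1:]))
def matchesB (tp : List (String × List (String × List Int))) (doc : String)
    (s : Int) (rest : List String) : Bool :=
  match rest with
  | [] => true
  | t :: ts => decide ((s + 1) ∈ posB tp doc t) && matchesB tp doc (s + 1) ts

def exact_phrase_hits_py_alt (query_terms : List String) (doc_id : String) (term_positions : List (String × List (String × List Int))) : Int :=
  match query_terms with
  | q0 :: t1 :: ts =>
    -- sum(1 for s in pos(query_terms[0]) if matches(s, query_terms[1:]))
    ((posB term_positions doc_id q0).countP
      (fun s => matchesB term_positions doc_id s (t1 :: ts)) : Int)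
  | _ => 0

-- ===== PRECONDITION & SPEC =====
def Spec_exact_phrase_hits_py (query_terms : List String) (doc_id : String) (term_positions : List (String × List (String × List Int))) (out : Int) : Prop := out = exact_phrase_hits_py_alt query_terms doc_id term_positions
instance (query_terms : List String) (doc_id : String) (term_positions : List (String × List (String × List Int))) (out : Int) : Decidable (Spec_exact_phrase_hits_py query_terms doc_id term_positions out) := by unfold Spec_exact_phrase_hits_py; infer_instance

-- ===== CLAIM (what is proved, stated in full; the proofs are below) =====
def Claim_equal_exact_phrase_hits_py : Prop := ∀ (query_terms : List String) (doc_id : String) (term_positions : List (String × List (String × List Int))), Dom_exact_phrase_hits_py query_terms doc_id term_positions → Spec_exact_phrase_hits_py query_terms doc_id term_positions (exact_phrase_hits_py query_terms doc_id term_positions)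

-- ===== LEMMAS AND PROOFS =====

theorem posB_eq (tp : List (String × List (String × List Int))) (doc term : String) :
    posB tp doc term = tpGet tp term doc := rfl

-- when A builds its lookup sets, its per-start set check agrees with B's recursive walk
theorem checkAll_eq_matches (doc : String) (tp : List (String × List (String × List Int))) :
    ∀ (rest : List String) (sets : List (PySem.Set Int)),
      buildSetsA rest doc tp = some sets →
      ∀ (start off : Int), checkAllA start sets off = matchesB tp doc (start + off) rest := by
  intro rest
  induction rest with
  | nil =>
    intro sets h start off
    simp only [buildSetsA, Option.some.injEq] at h
    subst h; rfl
  | cons t ts ih =>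
    intro sets h start off
    by_cases hp : tpGet tp t doc = []
    · simp [buildSetsA, hp] at h
    · simp only [buildSetsA, hp, ite_false] at h
      cases hb : buildSetsA ts doc tp with
      | none => rw [hb] at h; exact absurd h (by simp)
      | some ls =>
        rw [hb] at h
        simp only [Option.some.injEq] at h
        subst h
        show (PySem.Set.contains (PySem.Set.ofList (tpGet tp t doc)) (start + off + 1)
              && checkAllA start ls (off + 1))
            = (decide ((start + off + 1) ∈ posB tp doc t) && matchesB tp doc (start + off + 1) ts)
        have h1 : PySem.Set.contains (PySem.Set.ofList (tpGet tp t doc)) (start + off + 1)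
            = decide ((start + off + 1) ∈ posB tp doc t) := by
          rw [posB_eq]
          by_cases hm : (start + off + 1) ∈ tpGet tp t doc
          · simp [hm]
          · simp only [hm, decide_false]
            rw [Bool.eq_false_iff]
            intro hc
            exact hm ((PySem.Set.mem_ofList _ _).1 ((PySem.Set.contains_iff _ _).1 hc))
        have h2 : checkAllA start ls (off + 1) = matchesB tp doc (start + off + 1) ts := by
          have := ih ls hb start (off + 1)
          rwa [show start + (off + 1) = start + off + 1 by ring] at this
        rw [h1, h2]

-- when A returns 0 early (some later term has no positions), B's walk fails for every start
theorem matches_false_of_none (doc : String) (tp : List (String × List (String × List Int))) :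
    ∀ (rest : List String), buildSetsA rest doc tp = none →
      ∀ s : Int, matchesB tp doc s rest = false := by
  intro rest
  induction rest with
  | nil => intro h; simp [buildSetsA] at h
  | cons t ts ih =>
    intro h s
    by_cases hp : tpGet tp t doc = []
    · simp [matchesB, posB_eq, hp]
    · simp only [buildSetsA, hp, ite_false] at h
      cases hb : buildSetsA ts doc tp with
      | none => simp [matchesB, ih hb (s + 1)]
      | some ls => rw [hb] at h; exact absurd h (by simp)

-- A's counting foldl equals a countP, offset by the accumulator
theorem foldl_count (p : Int → Bool) :
    ∀ (l : List Int) (acc : Int),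
      l.foldl (fun hits start => if p start then hits + 1 else hits) acc
        = acc + (l.countP p : Int) := by
  intro l
  induction l with
  | nil => intro acc; simp
  | cons x xs ih =>
    intro acc
    by_cases hx : p x
    · simp [List.foldl, hx, ih]; ring
    · simp [List.foldl, hx, ih]

-- ===== VERDICT (by name: the statement is the Claim_ definition above) =====
theorem exact_phrase_hits_py_spec : Claim_equal_exact_phrase_hits_py := by
  intro query_terms doc_id term_positions _
  unfold Spec_exact_phrase_hits_py
  match query_terms with
  | [] => rfl
  | [_] => rfl
  | q0 :: q1 :: qs =>
    unfold exact_phrase_hits_py exact_phrase_hits_py_alt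
    simp only [posB_eq]
    by_cases hf : tpGet term_positions q0 doc_id = []
    · simp [hf]
    · simp only [hf, ite_false]
      cases hb : buildSetsA (q1 :: qs) doc_id term_positions with
      | none =>
        have hall : ∀ s ∈ tpGet term_positions q0 doc_id,
            matchesB term_positions doc_id s (q1 :: qs) = false :=
          fun s _ => matches_false_of_none doc_id term_positions _ hb s
        rw [List.countP_eq_zero.2 (by intro s hs; simp [hall s hs])]
        rfl
      | some sets =>
        show List.foldl (fun hits start => if checkAllA start sets 0 = true then hits + 1 else hits)
              0 (tpGet term_positions q0 doc_id) = _
        rw [foldl_count]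
        have : ∀ s : Int, checkAllA s sets 0 = matchesB term_positions doc_id s (q1 :: qs) := by
          intro s
          have := checkAll_eq_matches doc_id term_positions _ sets hb s 0
          rwa [show s + (0:Int) = s by ring] at this
        simp [this]
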